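-- pv_equiv track=rewrite | github.com/vvatter/indecomposable-matchings | nijenwilf.py | isstrongindecomp
-- ===== SOURCE A (Python) =====
-- def isstrongindecomp(mat):
--   # Check for intervals of size 2 first
--   for i in range(len(mat)-1):
--     if abs(mat[i] - mat[i+1]) == 1:
--       return(False)
--   for ln in range(4, int(len(mat)/2)):
--     # ln will be the length of the interval
--     for i in range(len(mat)-ln+1):
--       Ends = [mat[j] for j in range(i,i+ln)]
--       if max(Ends) - min(Ends) + 1 == ln:
--         return(False)
--   return(True)
-- ===== SOURCE B (Python) =====
-- def isstrongindecomp(mat):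
--     # One pass per start index with running min/max: O(n^2) instead of
--     # recomputing max/min of every window (O(n^3)).
--     n = len(mat)
--     ub = n // 2  # the original checks interval lengths 4 .. ub-1 (and 2)
--     for i in range(n):
--         lo = hi = mat[i]
--         ln = 1
--         for j in range(i + 1, n):
--             v = mat[j]
--             if v < lo:
--                 lo = v
--             if v > hi:
--                 hi = v
--             ln += 1
--             if ln == 2:
--                 if hi - lo == 1:
--                     return False
--             elif 4 <= ln < ub and hi - lo + 1 == ln:
--                 return False
--     return True
-- ===== Notes on version B (the rewrite author's own statement) =====
-- stated objective: faster
-- what changed: Instead of recomputing max/min of every window for every length (three nested passes), B makes one pass per start index keeping a running min/max while the window grows, checking the length-2 and length-4..n//2-1 conditions as it extends.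
import Mathlib
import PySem

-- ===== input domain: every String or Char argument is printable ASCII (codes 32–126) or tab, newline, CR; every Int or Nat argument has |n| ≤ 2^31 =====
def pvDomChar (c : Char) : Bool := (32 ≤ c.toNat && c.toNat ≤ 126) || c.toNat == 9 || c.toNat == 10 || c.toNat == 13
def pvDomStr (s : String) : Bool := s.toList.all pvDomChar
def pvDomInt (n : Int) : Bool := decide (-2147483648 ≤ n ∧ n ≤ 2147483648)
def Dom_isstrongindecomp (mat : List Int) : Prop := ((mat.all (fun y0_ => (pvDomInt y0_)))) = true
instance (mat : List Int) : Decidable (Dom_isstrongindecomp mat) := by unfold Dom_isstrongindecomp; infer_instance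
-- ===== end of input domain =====

-- B replaces A's three nested passes (recomputing max/min of every window of every
-- length) by one pass per start index carrying a running min/max: O(n^2) vs O(n^3).

-- ===== PORT A =====
-- max(l) / min(l) of a (here always nonempty) list; default never used.
def pyMaxD (l : List Int) : Int := (PySem.List.max? l (fun y => y)).getD 0
def pyMinD (l : List Int) : Int := (PySem.List.min? l (fun y => y)).getD 0

def isstrongindecomp (mat : List Int) : Bool :=
  -- for i in range(len(mat)-1): if abs(mat[i]-mat[i+1]) == 1: return False
  if (List.range (mat.length - 1)).any (fun i =>
      ((mat.getD i 0) - (mat.getD (i + 1) 0)).natAbs == 1) then false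
  -- for ln in range(4, int(len(mat)/2)): for i in range(len(mat)-ln+1):
  --   Ends = [mat[j] for j in range(i,i+ln)]; if max(Ends)-min(Ends)+1 == ln: return False
  else if (List.range' 4 (mat.length / 2 - 4)).any (fun ln =>
      (List.range (mat.length - ln + 1)).any (fun i =>
        pyMaxD ((List.range' i ln).map (fun j => mat.getD j 0)) -
          pyMinD ((List.range' i ln).map (fun j => mat.getD j 0)) + 1 == (ln : Int))) then false
  else true

-- ===== PORT B =====
-- inner loop: window grows from length ln, running min lo / max hi
def goB (ub : Nat) (ln : Nat) (lo hi : Int) : List Int → Bool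
  | [] => false
  | v :: rest =>
    let lo' := if v < lo then v else lo
    let hi' := if hi < v then v else hi
    let ln' := ln + 1
    if (ln' == 2 && (hi' - lo' == 1))
        || (decide (4 ≤ ln') && decide (ln' < ub) && (hi' - lo' + 1 == (ln' : Int))) then
      true
    else goB ub ln' lo' hi' rest

-- outer loop: one pass per start index
def outerB (ub : Nat) : List Int → Bool
  | [] => false
  | x :: rest => goB ub 1 x x rest || outerB ub rest

def isstrongindecomp_alt (mat : List Int) : Bool :=
  !(outerB (mat.length / 2) mat)

-- ===== PRECONDITION & SPEC =====
def Spec_isstrongindecomp (mat : List Int) (out : Bool) : Prop := out = isstrongindecomp_alt mat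
instance (mat : List Int) (out : Bool) : Decidable (Spec_isstrongindecomp mat out) := by unfold Spec_isstrongindecomp; infer_instance

-- ===== CLAIM (what is proved, stated in full; the proofs are below) =====
def Claim_equal_isstrongindecomp : Prop := ∀ (mat : List Int), Dom_isstrongindecomp mat → Spec_isstrongindecomp mat (isstrongindecomp mat)

-- ===== LEMMAS AND PROOFS =====

-- condition checked on a window w of length L (ub = n/2)
def winC (ub L : Nat) (w : List Int) : Prop :=
  (L = 2 ∧ pyMaxD w - pyMinD w = 1) ∨
  (4 ≤ L ∧ L < ub ∧ pyMaxD w - pyMinD w + 1 = (L : Int))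

-- the common "a bad window exists" proposition
def BadWin (mat : List Int) : Prop :=
  ∃ i t, i + (t + 2) ≤ mat.length ∧
    winC (mat.length / 2) (t + 2) ((mat.drop i).take (t + 2))

theorem pyMaxD_cons (x : Int) (t : List Int) : pyMaxD (x :: t) = t.foldl max x := by
  simp [pyMaxD, PySem.List.max?_id_cons]

theorem pyMinD_cons (x : Int) (t : List Int) : pyMinD (x :: t) = t.foldl min x := by
  simp [pyMinD, PySem.List.min?_id_cons]

theorem map_range'_getD (mat : List Int) :
    ∀ (ln i : Nat), i + ln ≤ mat.length →
      (List.range' i ln).map (fun j => mat.getD j 0) = (mat.drop i).take ln := by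
  intro ln
  induction ln with
  | zero => intro i _; simp
  | succ m ih =>
    intro i h
    have hi : i < mat.length := by omega
    rw [List.range'_succ, List.map_cons, List.drop_eq_getElem_cons hi, List.take_succ_cons,
      ih (i + 1) (by omega), List.getD_eq_getElem mat 0 hi]

theorem goB_spec (ub : Nat) :
    ∀ (rest : List Int) (ln : Nat) (lo hi : Int),
      goB ub ln lo hi rest = true ↔
        ∃ t, t < rest.length ∧
          ((ln + t + 1 = 2 ∧ (rest.take (t + 1)).foldl max hi - (rest.take (t + 1)).foldl min lo = 1) ∨
           (4 ≤ ln + t + 1 ∧ ln + t + 1 < ub ∧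
            (rest.take (t + 1)).foldl max hi - (rest.take (t + 1)).foldl min lo + 1 = ((ln + t + 1 : Nat) : Int))) := by
  intro rest
  induction rest with
  | nil => intro ln lo hi; simp [goB]
  | cons v r ih =>
    intro ln lo hi
    rw [goB]
    have hifmin : (if v < lo then v else lo) = min lo v := by
      simp only [min_def]; split_ifs <;> omega
    have hifmax : (if hi < v then v else hi) = max hi v := by
      simp only [max_def]; split_ifs <;> omega
    simp only [hifmin, hifmax]
    by_cases hc :
        ((ln + 1 == 2 && (max hi v - min lo v == 1))
          || (decide (4 ≤ ln + 1) && decide (ln + 1 < ub)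
              && (max hi v - min lo v + 1 == ((ln + 1 : Nat) : Int)))) = true
    · simp only [hc, if_true, true_iff]
      refine ⟨0, by simp, ?_⟩
      simp only [List.take_succ_cons, List.take_zero, List.foldl_cons, List.foldl_nil]
      simp only [Bool.or_eq_true, Bool.and_eq_true, beq_iff_eq, decide_eq_true_eq] at hc
      rcases hc with ⟨h1, h2⟩ | ⟨⟨h1, h2⟩, h3⟩
      · exact Or.inl ⟨by omega, h2⟩
      · exact Or.inr ⟨by omega, h2, h3⟩
    · simp only [hc, Bool.false_eq_true, if_false]
      rw [ih (ln + 1) (min lo v) (max hi v)]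
      constructor
      · rintro ⟨t, ht, hC⟩
        refine ⟨t + 1, by simpa using ht, ?_⟩
        simpa [List.take_succ_cons, List.foldl_cons, Nat.add_assoc,
          Nat.add_comm 1 t, Nat.add_left_comm] using hC
      · rintro ⟨t, ht, hC⟩
        cases t with
        | zero =>
          exfalso
          apply hc
          simp only [List.take_succ_cons, List.take_zero, List.foldl_cons, List.foldl_nil] at hC
          simp only [Bool.or_eq_true, Bool.and_eq_true, beq_iff_eq, decide_eq_true_eq]
          rcases hC with ⟨h1, h2⟩ | ⟨h1, h2, h3⟩
          · exact Or.inl ⟨by omega, h2⟩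
          · exact Or.inr ⟨⟨by omega, h2⟩, h3⟩
        | succ s =>
          refine ⟨s, by simpa using ht, ?_⟩
          simpa [List.take_succ_cons, List.foldl_cons, Nat.add_assoc,
            Nat.add_comm 1 s, Nat.add_left_comm] using hC

theorem outerB_spec (ub : Nat) :
    ∀ (l : List Int), outerB ub l = true ↔
      ∃ i t, i + (t + 2) ≤ l.length ∧
        ((t + 2 = 2 ∧ pyMaxD ((l.drop i).take (t + 2)) - pyMinD ((l.drop i).take (t + 2)) = 1) ∨
         (4 ≤ t + 2 ∧ t + 2 < ub ∧
          pyMaxD ((l.drop i).take (t + 2)) - pyMinD ((l.drop i).take (t + 2)) + 1 = ((t + 2 : Nat) : Int))) := by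
  intro l
  induction l with
  | nil => simp [outerB]
  | cons x r ih =>
    rw [outerB, Bool.or_eq_true, ih, goB_spec]
    constructor
    · rintro (⟨t, ht, hC⟩ | ⟨i, t, hit, hC⟩)
      · refine ⟨0, t, by simpa using ht, ?_⟩
        simpa [List.take_succ_cons, pyMaxD_cons, pyMinD_cons, Nat.add_comm 1 t,
          Nat.add_assoc, Nat.add_left_comm] using hC
      · exact ⟨i + 1, t, by simp only [List.length_cons]; omega, by simpa using hC⟩
    · rintro ⟨i, t, hit, hC⟩
      cases i with
      | zero =>
        refine Or.inl ⟨t, by simpa using hit, ?_⟩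
        simpa [List.take_succ_cons, pyMaxD_cons, pyMinD_cons, Nat.add_comm 1 t,
          Nat.add_assoc, Nat.add_left_comm] using hC
      | succ j =>
        exact Or.inr ⟨j, t, by simp only [List.length_cons] at hit; omega, by simpa using hC⟩

theorem alt_true_iff (mat : List Int) :
    isstrongindecomp_alt mat = true ↔ ¬ BadWin mat := by
  rw [isstrongindecomp_alt, Bool.not_eq_eq_eq_not, Bool.not_true,
    ← Bool.not_eq_true, not_iff_not, outerB_spec]
  simp only [BadWin, winC]

-- window of length 2 at i is the two-element list of adjacent entries
theorem win_two (mat : List Int) (i : Nat) (h : i + 2 ≤ mat.length) :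
    (mat.drop i).take 2 = [mat.getD i 0, mat.getD (i + 1) 0] := by
  rw [← map_range'_getD mat 2 i h]
  rfl

theorem natAbs_iff_maxmin (a b : Int) :
    (a - b).natAbs = 1 ↔ [b].foldl max a - [b].foldl min a = 1 := by
  simp only [List.foldl_cons, List.foldl_nil, max_def, min_def]
  rw [Int.natAbs_eq_iff]
  split_ifs <;> omega

theorem a_true_iff (mat : List Int) :
    isstrongindecomp mat = true ↔ ¬ BadWin mat := by
  rw [isstrongindecomp]
  by_cases h1 : (List.range (mat.length - 1)).any (fun i =>
      ((mat.getD i 0) - (mat.getD (i + 1) 0)).natAbs == 1) = true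
  · rw [if_pos h1]
    rw [List.any_eq_true] at h1
    obtain ⟨i, hi, habs⟩ := h1
    rw [List.mem_range] at hi
    rw [beq_iff_eq] at habs
    have hle : i + 2 ≤ mat.length := by omega
    have hbad : BadWin mat := by
      refine ⟨i, 0, hle, Or.inl ⟨rfl, ?_⟩⟩
      rw [win_two mat i hle, pyMaxD_cons, pyMinD_cons]
      exact (natAbs_iff_maxmin _ _).mp habs
    simp [hbad]
  · rw [if_neg h1]
    by_cases h2 : (List.range' 4 (mat.length / 2 - 4)).any (fun ln =>
        (List.range (mat.length - ln + 1)).any (fun i =>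
          pyMaxD ((List.range' i ln).map (fun j => mat.getD j 0)) -
            pyMinD ((List.range' i ln).map (fun j => mat.getD j 0)) + 1 == (ln : Int))) = true
    · rw [if_pos h2]
      rw [List.any_eq_true] at h2
      obtain ⟨ln, hln, h2⟩ := h2
      rw [List.any_eq_true] at h2
      obtain ⟨i, hi, hval⟩ := h2
      rw [List.mem_range'_1] at hln
      rw [List.mem_range] at hi
      rw [beq_iff_eq] at hval
      have h4 : 4 ≤ ln := hln.1
      have hub : ln < mat.length / 2 := by omega
      have hle : i + ln ≤ mat.length := by
        have := Nat.div_le_self mat.length 2; omega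
      have hbad : BadWin mat := by
        refine ⟨i, ln - 2, by omega, Or.inr ⟨by omega, by omega, ?_⟩⟩
        have h2eq : ln - 2 + 2 = ln := by omega
        rw [h2eq, ← map_range'_getD mat ln i hle]
        simpa using hval
      simp [hbad]
    · rw [if_neg h2]
      simp only [true_iff]
      rintro ⟨i, t, hit, hC⟩
      rcases hC with ⟨ht2, hval⟩ | ⟨h4, hub, hval⟩
      · have ht0 : t = 0 := by omega
        subst ht0
        apply h1
        rw [List.any_eq_true]
        refine ⟨i, by rw [List.mem_range]; omega, ?_⟩
        rw [beq_iff_eq, natAbs_iff_maxmin, ← pyMaxD_cons, ← pyMinD_cons, ← win_two mat i hit]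
        exact hval
      · apply h2
        rw [List.any_eq_true]
        refine ⟨t + 2, ?_, ?_⟩
        · rw [List.mem_range'_1]
          constructor
          · omega
          · omega
        · rw [List.any_eq_true]
          refine ⟨i, by rw [List.mem_range]; omega, ?_⟩
          rw [beq_iff_eq, map_range'_getD mat (t + 2) i hit]
          exact hval

-- ===== VERDICT (by name: the statement is the Claim_ definition above) =====
theorem isstrongindecomp_spec : Claim_equal_isstrongindecomp := by
  intro mat _
  show isstrongindecomp mat = isstrongindecomp_alt mat
  rw [Bool.eq_iff_iff, a_true_iff, alt_true_iff]
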